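-- pv_equiv track=rewrite | github.com/capocchi/DEVSimPy | Utilities.py | IsAllDigits
-- ===== SOURCE A (Python) =====
-- import string
--
-- def IsAllDigits(str):
-- 	""" Is the given string composed entirely of digits? """
--
-- 	match = string.digits+'.'
-- 	ok = 1
-- 	for letter in str:
-- 		if letter not in match:
-- 			ok = 0
-- 			break
-- 	return ok
-- ===== SOURCE B (Python) =====
-- import re
--
-- _PAT = re.compile(r'[0-9.]*\Z')
--
-- def IsAllDigits(str):
-- 	""" Is the given string composed entirely of digits? """
-- 	return int(bool(_PAT.match(str)))
-- ===== Notes on version B (the rewrite author's own statement) =====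
-- stated objective: idiomatic
-- what changed: Replaced the explicit per-character loop with early break by a single precompiled regex full-match against the character class [0-9.]*, coerced to int.
import Mathlib
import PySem

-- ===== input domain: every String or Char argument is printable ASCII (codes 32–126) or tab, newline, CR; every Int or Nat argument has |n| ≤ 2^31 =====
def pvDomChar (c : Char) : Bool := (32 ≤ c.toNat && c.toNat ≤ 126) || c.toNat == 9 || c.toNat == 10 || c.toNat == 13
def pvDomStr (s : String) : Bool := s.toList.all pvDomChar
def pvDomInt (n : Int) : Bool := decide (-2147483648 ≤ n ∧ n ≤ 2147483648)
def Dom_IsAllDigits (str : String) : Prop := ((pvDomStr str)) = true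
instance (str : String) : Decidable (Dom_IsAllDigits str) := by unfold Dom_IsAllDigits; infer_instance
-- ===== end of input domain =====

-- B replaces A's explicit loop+early-break by a single regex full-match against [0-9.]* (idiomatic; same cost).

-- ===== PORT A =====
-- A's loop: for letter in str: if letter not in match: ok = 0; break — ported as structural recursion over the chars.
def IsAllDigitsLoop (matchChars : List Char) : List Char → Int
  | [] => 1
  | c :: rest => if matchChars.contains c then IsAllDigitsLoop matchChars rest else 0

def IsAllDigits (str : String) : Int :=
  IsAllDigitsLoop ("0123456789".toList ++ ['.']) str.toList

-- ===== PORT B =====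
-- Source B's regex fullmatch of the character class [0-9.]* is exactly: every character is a digit or '.';
-- the regex call is ported as that all-characters test (List.all), coerced to int.
def IsAllDigits_alt (str : String) : Int :=
  if str.toList.all (fun c => ('0' ≤ c && c ≤ '9') || c == '.') then 1 else 0

-- ===== PRECONDITION & SPEC =====
def Spec_IsAllDigits (str : String) (out : Int) : Prop := out = IsAllDigits_alt str
instance (str : String) (out : Int) : Decidable (Spec_IsAllDigits str out) := by unfold Spec_IsAllDigits; infer_instance

-- ===== CLAIM (what is proved, stated in full; the proofs are below) =====
def Claim_equal_IsAllDigits : Prop := ∀ (str : String), Dom_IsAllDigits str → Spec_IsAllDigits str (IsAllDigits str)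

-- ===== LEMMAS AND PROOFS =====
theorem memClass (c : Char) :
    ("0123456789.".toList.contains c) = (('0' ≤ c && c ≤ '9') || c == '.') := by
  have hs : "0123456789.".toList = ['0','1','2','3','4','5','6','7','8','9','.'] := by decide
  have hv : ∀ d : Char, (c = d) ↔ c.val.toNat = d.val.toNat := by
    intro d
    constructor
    · rintro rfl; rfl
    · intro h; exact Char.ext (UInt32.toNat.inj h)
  have hle : ∀ d : Char, (d ≤ c ↔ d.val.toNat ≤ c.val.toNat) ∧ (c ≤ d ↔ c.val.toNat ≤ d.val.toNat) := by
    intro d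
    constructor <;> exact UInt32.le_iff_toNat_le
  rw [hs, Bool.eq_iff_iff]
  simp only [List.contains_eq_mem, List.mem_cons, List.not_mem_nil, or_false,
    Bool.or_eq_true, Bool.and_eq_true, decide_eq_true_eq, beq_iff_eq,
    hv, (hle '0').1, (hle '9').2]
  have h0 : ('0' : Char).val.toNat = 48 := by decide
  have h9 : ('9' : Char).val.toNat = 57 := by decide
  have hd : ('.' : Char).val.toNat = 46 := by decide
  have h1 : ('1' : Char).val.toNat = 49 := by decide
  have h2 : ('2' : Char).val.toNat = 50 := by decide
  have h3 : ('3' : Char).val.toNat = 51 := by decide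
  have h4 : ('4' : Char).val.toNat = 52 := by decide
  have h5 : ('5' : Char).val.toNat = 53 := by decide
  have h6 : ('6' : Char).val.toNat = 54 := by decide
  have h7 : ('7' : Char).val.toNat = 55 := by decide
  have h8 : ('8' : Char).val.toNat = 56 := by decide
  rw [h0, h9, hd, h1, h2, h3, h4, h5, h6, h7, h8]
  omega

theorem loop_eq (cs : List Char) :
    IsAllDigitsLoop ("0123456789".toList ++ ['.']) cs
      = (if cs.all (fun c => ('0' ≤ c && c ≤ '9') || c == '.') then 1 else 0) := by
  have hm : ("0123456789".toList ++ ['.']) = "0123456789.".toList := by decide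
  induction cs with
  | nil => rfl
  | cons c rest ih =>
    simp only [IsAllDigitsLoop, List.all_cons, hm, memClass c]
    by_cases h : (('0' ≤ c && c ≤ '9') || c == '.') = true
    · rw [if_pos h]; simp only [h, Bool.true_and, ← hm, ih]
    · simp only [Bool.not_eq_true] at h
      simp [h]

-- ===== VERDICT (by name: the statement is the Claim_ definition above) =====
theorem IsAllDigits_spec : Claim_equal_IsAllDigits := by
  intro str _
  unfold Spec_IsAllDigits IsAllDigits IsAllDigits_alt
  rw [loop_eq]
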